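-- pv_equiv track=rewrite | github.com/brodayagabro/SpikingNN | Article_jan_2025/NMs.py | determ_spikes
-- ===== SOURCE A (Python) =====
-- def determ_spikes(firings_t, firings_n, N):
--     firings=[]
--     for n in range(N):
--         firing = []
--         for i in range(len(firings_t)):
--             if firings_n[i] == n:
--                 firing.append(firings_t[i])
--
--         firings.append(firing)
--     return firings
-- ===== SOURCE B (Python) =====
-- def determ_spikes(firings_t, firings_n, N):
--     # Single pass: group spike times by neuron id in a dict, then read out 0..N-1.
--     groups = {}
--     for n, t in zip(firings_n, firings_t):
--         groups.setdefault(n, []).append(t)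
--     return [groups.get(n, []) for n in range(N)]
-- ===== Notes on version B (the rewrite author's own statement) =====
-- stated objective: faster
-- what changed: Replaces the loop over all N neurons each rescanning the whole spike list by one pass that groups spike times in a dict keyed by neuron id, then a single read-out over range(N).
import Mathlib
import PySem

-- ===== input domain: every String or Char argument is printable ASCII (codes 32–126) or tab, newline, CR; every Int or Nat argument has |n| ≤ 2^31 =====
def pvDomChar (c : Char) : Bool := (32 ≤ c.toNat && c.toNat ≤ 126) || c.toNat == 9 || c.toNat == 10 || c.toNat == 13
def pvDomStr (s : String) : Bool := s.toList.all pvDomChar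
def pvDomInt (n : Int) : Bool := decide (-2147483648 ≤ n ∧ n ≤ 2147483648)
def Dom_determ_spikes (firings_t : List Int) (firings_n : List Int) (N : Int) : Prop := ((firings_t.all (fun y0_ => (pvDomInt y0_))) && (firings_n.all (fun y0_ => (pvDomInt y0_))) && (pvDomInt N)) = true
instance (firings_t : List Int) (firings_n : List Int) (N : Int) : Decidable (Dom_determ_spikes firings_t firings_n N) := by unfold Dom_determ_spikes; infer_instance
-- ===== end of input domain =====

-- B groups spike times by neuron id in one dict pass instead of rescanning all spikes for each neuron (objective: faster, asymptotic).

-- ===== PORT A =====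
-- Literal port of A: for n in range(N): for i in range(len(firings_t)): if firings_n[i] == n: firing.append(firings_t[i]).
-- Indexing uses pyGetD with default 0; exact under Pre_ (there firings_n[i] is in range for every visited i).
def determ_spikes (firings_t : List Int) (firings_n : List Int) (N : Int) : List (List Int) :=
  (PySem.List.pyRange 0 N 1).foldl (fun firings n =>
    firings ++ [(PySem.List.pyRange 0 (firings_t.length : Int) 1).foldl (fun firing i =>
      if PySem.List.pyGetD firings_n i 0 = n
      then firing ++ [PySem.List.pyGetD firings_t i 0]
      else firing) []]) []

-- ===== PORT B =====
-- Literal port of B: groups.setdefault(n, []).append(t) over zip(firings_n, firings_t), then [groups.get(n, []) for n in range(N)].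
def determ_spikes_alt (firings_t : List Int) (firings_n : List Int) (N : Int) : List (List Int) :=
  let groups := (firings_n.zip firings_t).foldl
    (fun d p => d.modify p.1 [] (fun l => l ++ [p.2])) (PySem.Dict.empty)
  (PySem.List.pyRange 0 N 1).map (fun n => groups.getD n [])

-- ===== PRECONDITION & SPEC =====
-- Pre_ excludes exactly the inputs where A raises IndexError: N ≥ 1 with firings_n shorter than firings_t.
def Pre_determ_spikes (firings_t : List Int) (firings_n : List Int) (N : Int) : Prop :=
  firings_t.length ≤ firings_n.length ∨ N ≤ 0
instance (firings_t : List Int) (firings_n : List Int) (N : Int) : Decidable (Pre_determ_spikes firings_t firings_n N) := by unfold Pre_determ_spikes; infer_instance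
def pvWitness_determ_spikes : List Int × List Int × Int := ([3, 1, 3], [1, 0, 1], 3)

def Spec_determ_spikes (firings_t : List Int) (firings_n : List Int) (N : Int) (out : List (List Int)) : Prop := out = determ_spikes_alt firings_t firings_n N
instance (firings_t : List Int) (firings_n : List Int) (N : Int) (out : List (List Int)) : Decidable (Spec_determ_spikes firings_t firings_n N out) := by unfold Spec_determ_spikes; infer_instance

-- ===== CLAIM (what is proved, stated in full; the proofs are below) =====
def Claim_equal_determ_spikes : Prop := ∀ (firings_t : List Int) (firings_n : List Int) (N : Int), Dom_determ_spikes firings_t firings_n N → Pre_determ_spikes firings_t firings_n N → Spec_determ_spikes firings_t firings_n N (determ_spikes firings_t firings_n N)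

-- ===== LEMMAS AND PROOFS =====

-- A's inner loop over indices equals filtering the zipped pair list by neuron id.
lemma innerA_eq_filter (firings_t firings_n : List Int)
    (h : firings_t.length ≤ firings_n.length) (n : Int) :
    (PySem.List.pyRange 0 (firings_t.length : Int) 1).foldl (fun firing i =>
      if PySem.List.pyGetD firings_n i 0 = n
      then firing ++ [PySem.List.pyGetD firings_t i 0]
      else firing) []
    = ((firings_n.zip firings_t).filter (fun p => p.1 == n)).map (·.2) := by
  set zs := firings_n.zip firings_t with hzs
  have hlen : zs.length = firings_t.length := by
    simp [hzs, List.length_zip]; omega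
  have hcongr : ∀ (acc : List Int) (i : Int), i ∈ PySem.List.pyRange 0 (firings_t.length : Int) 1 →
      (if PySem.List.pyGetD firings_n i 0 = n
       then acc ++ [PySem.List.pyGetD firings_t i 0] else acc)
      = (if (PySem.List.pyGetD zs i (0, 0)).1 = n
         then acc ++ [(PySem.List.pyGetD zs i (0, 0)).2] else acc) := by
    intro acc i hi
    rw [PySem.List.mem_pyRange_one] at hi
    have h1 : i < (firings_n.length : Int) := by omega
    have hz : i < (zs.length : Int) := by omega
    rw [PySem.List.pyGetD_eq_getElem firings_n 0 hi.1 h1,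
        PySem.List.pyGetD_eq_getElem firings_t 0 hi.1 hi.2,
        PySem.List.pyGetD_eq_getElem zs ((0,0) : Int × Int) hi.1 hz]
    have hzget : zs[i.toNat]'(by omega) =
        (firings_n[i.toNat]'(by omega), firings_t[i.toNat]'(by omega)) := by
      simp [hzs, List.getElem_zip]
    rw [hzget]
  rw [PySem.List.foldl_congr_mem _ _ _ _ (fun acc i hi => hcongr acc i hi)]
  rw [← hlen]
  rw [PySem.List.foldl_pyRange_zero_pyGetD' zs (0, 0)
        (fun acc p => if p.1 = n then acc ++ [p.2] else acc) []]
  rw [PySem.List.foldl_append_ite]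
  rw [List.nil_append]
  rfl

-- B's dict lookup at n equals the same filtered list.
lemma groupsB_eq_filter (firings_t firings_n : List Int) (n : Int) :
    ((firings_n.zip firings_t).foldl
      (fun d p => d.modify p.1 [] (fun l => l ++ [p.2])) (PySem.Dict.empty)).getD n []
    = ((firings_n.zip firings_t).filter (fun p => p.1 == n)).map (·.2) := by
  rw [PySem.Dict.getD_foldl_modify_append]
  simp

theorem determ_spikes_spec : Claim_equal_determ_spikes := by
  intro firings_t firings_n N _ hpre
  unfold Spec_determ_spikes determ_spikes determ_spikes_alt
  rcases hpre with h | h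
  · rw [PySem.List.foldl_append_singleton_eq_map]
    simp only [List.nil_append]
    apply List.map_congr_left
    intro n _
    rw [innerA_eq_filter firings_t firings_n h n, groupsB_eq_filter]
  · rw [show PySem.List.pyRange 0 N 1 = [] from PySem.List.pyRange_one_eq_nil h]
    simp
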